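-- pv_equiv track=rewrite | github.com/ankul-in/Two-years | KATA84.py | get_consective_items
-- ===== SOURCE A (Python) =====
-- def get_consective_items(items, key):
--     count=0
--     countlist=[]
--     key=str(key)
--     for i in str(items):
--         if i!=key:
--             countlist.append(count)
--             count=0
--         else:
--             count+=1
--     countlist.append(count)
--     return max(countlist)
-- ===== SOURCE B (Python) =====
-- from itertools import groupby
--
-- def get_consective_items(items, key):
--     key = str(key)
--     return max((len(list(g)) for k, g in groupby(str(items)) if k == key), default=0)
-- ===== Notes on version B (the rewrite author's own statement) =====
-- stated objective: idiomatic
-- what changed: Replaces the running-counter loop that appends partial counts into a list and takes max(list) with an itertools.groupby pass over maximal runs, taking max(len(run) for runs whose char equals key, default=0).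
import Mathlib
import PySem

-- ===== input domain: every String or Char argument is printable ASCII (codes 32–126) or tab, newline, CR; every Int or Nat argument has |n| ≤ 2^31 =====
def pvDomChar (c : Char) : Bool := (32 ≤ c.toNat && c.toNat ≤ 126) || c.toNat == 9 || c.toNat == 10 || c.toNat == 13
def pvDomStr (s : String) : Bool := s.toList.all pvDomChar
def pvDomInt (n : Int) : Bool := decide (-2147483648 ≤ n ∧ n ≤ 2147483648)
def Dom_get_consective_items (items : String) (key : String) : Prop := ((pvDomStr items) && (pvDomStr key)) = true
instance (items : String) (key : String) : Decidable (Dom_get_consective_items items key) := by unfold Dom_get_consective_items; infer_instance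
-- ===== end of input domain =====

-- B replaces A's running-counter loop (appending partial counts to a list, then max) with a
-- groupby-style pass over maximal runs, taking the max length of runs whose char equals key (default 0).

-- ===== PORT A =====
-- A's for-loop: state (count, countlist); branch order as in Python (`if i != key`).
def pvALoop (key : String) : List Char → Int → List Int → List Int
  | [], count, countlist => countlist ++ [count]
  | c :: cs, count, countlist =>
    if String.ofList [c] != key then pvALoop key cs 0 (countlist ++ [count])
    else pvALoop key cs (count + 1) countlist

def get_consective_items (items : String) (key : String) : Int :=
  -- max(countlist); the list always ends with the final count, so it is nonempty and the
  -- `none` branch (Python's ValueError on an empty max) is unreachable.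
  match PySem.List.max? (pvALoop key items.toList 0 []) (fun x => x) with
  | some m => m
  | none => 0

-- ===== PORT B =====
-- itertools.groupby: split into maximal runs (char, run length).
def pvRuns : List Char → List (Char × Int)
  | [] => []
  | c :: cs =>
    (c, 1 + ((cs.takeWhile (fun x => x == c)).length : Int)) :: pvRuns (cs.dropWhile (fun x => x == c))
termination_by l => l.length
decreasing_by
  have := List.length_dropWhile_le (fun x => x == c) cs
  simp; omega

def get_consective_items_alt (items : String) (key : String) : Int :=
  -- max((len(g) for k, g in groupby(items) if k == key), default=0)
  let lens := (pvRuns items.toList).filterMap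
      (fun p => if String.ofList [p.1] == key then some p.2 else none)
  match PySem.List.max? lens (fun x => x) with
  | some m => m
  | none => 0

-- ===== PRECONDITION & SPEC =====
def Spec_get_consective_items (items : String) (key : String) (out : Int) : Prop := out = get_consective_items_alt items key
instance (items : String) (key : String) (out : Int) : Decidable (Spec_get_consective_items items key out) := by unfold Spec_get_consective_items; infer_instance

-- ===== CLAIM (what is proved, stated in full; the proofs are below) =====
def Claim_equal_get_consective_items : Prop := ∀ (items : String) (key : String), Dom_get_consective_items items key → Spec_get_consective_items items key (get_consective_items items key)

-- ===== LEMMAS AND PROOFS =====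

-- Python max(list) with default 0 (value-level view of both ports' final match).
def pvMx (l : List Int) : Int :=
  match PySem.List.max? l (fun x => x) with
  | some m => m
  | none => 0

-- the per-character view of A's loop with the accumulator stripped off
def pvF (key : String) : List Char → Int → List Int
  | [], count => [count]
  | c :: cs, count =>
    if String.ofList [c] != key then count :: pvF key cs 0 else pvF key cs (count + 1)

-- the per-character view of B: lengths of maximal runs of key-matching chars
def pvG (key : String) : List Char → List Int
  | [] => []
  | c :: cs =>
    if String.ofList [c] == key then
      (1 + ((cs.takeWhile (fun x => String.ofList [x] == key)).length : Int)) ::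
        pvG key (cs.dropWhile (fun x => String.ofList [x] == key))
    else pvG key cs
termination_by l => l.length
decreasing_by
  · have := List.length_dropWhile_le (fun x => String.ofList [x] == key) cs
    simp; omega
  · simp

lemma pvMx_nil : pvMx [] = 0 := rfl

lemma pvMx_single (x : Int) : pvMx [x] = x := by
  simp [pvMx, PySem.List.max?_id_cons]

lemma pvALoop_eq (key : String) : ∀ (cs : List Char) (count : Int) (acc : List Int),
    pvALoop key cs count acc = acc ++ pvF key cs count := by
  intro cs
  induction cs with
  | nil => intro count acc; simp [pvALoop, pvF]
  | cons c cs ih =>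
    intro count acc
    simp only [pvALoop, pvF]
    split
    · rw [ih]; simp
    · rw [ih]

lemma pvFoldlMax_out (l : List Int) : ∀ (x y : Int),
    List.foldl max (max x y) l = max x (List.foldl max y l) := by
  induction l with
  | nil => intro x y; simp
  | cons z t ih =>
    intro x y
    simp only [List.foldl_cons]
    rw [max_assoc, ih]

lemma pvMx_cons (x : Int) (l : List Int) (hx : 0 ≤ x) : pvMx (x :: l) = max x (pvMx l) := by
  cases l with
  | nil =>
    rw [pvMx_single, pvMx_nil]
    omega
  | cons z t =>
    simp only [pvMx, PySem.List.max?_id_cons, List.foldl_cons]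
    rw [pvFoldlMax_out]

lemma pvMx_nonneg (l : List Int) (h : ∀ y ∈ l, 0 ≤ y) : 0 ≤ pvMx l := by
  unfold pvMx
  cases hm : PySem.List.max? l (fun x => x) with
  | none => simp
  | some v => exact h v (PySem.List.max?_mem hm)

lemma pvG_nonneg (key : String) : ∀ (n : ℕ) (cs : List Char), cs.length ≤ n →
    ∀ y ∈ pvG key cs, 0 ≤ y := by
  intro n
  induction n with
  | zero =>
    intro cs h
    have : cs = [] := by cases cs <;> simp_all
    subst this; simp [pvG]
  | succ n ih =>
    intro cs h y hy
    cases cs with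
    | nil => simp [pvG] at hy
    | cons c cs =>
      rw [pvG] at hy
      split at hy
      · rcases List.mem_cons.1 hy with h1 | h1
        · subst h1; positivity
        · have hd := List.length_dropWhile_le (fun x => String.ofList [x] == key) cs
          exact ih _ (by simp at h; omega) y h1
      · exact ih cs (by simp at h; omega) y hy

-- given that c matches key, the "matches key" predicate IS the "equals c" predicate
lemma pvPred_eq (key : String) (c : Char) (h : (String.ofList [c] == key) = true) :
    (fun x => String.ofList [x] == key) = (fun x => x == c) := by
  have hk : key = String.ofList [c] := (beq_iff_eq.1 h).symm
  funext x
  subst hk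
  simp [String.ext_iff]

lemma pvG_skip (key : String) : ∀ (pre rest : List Char),
    (∀ x ∈ pre, ¬ ((String.ofList [x] == key) = true)) →
    pvG key (pre ++ rest) = pvG key rest := by
  intro pre
  induction pre with
  | nil => intro rest _; simp
  | cons p pre ih =>
    intro rest h
    rw [List.cons_append, pvG, if_neg (h p (by simp))]
    exact ih rest (fun x hx => h x (by simp [hx]))

lemma pvRuns_filt_eq (key : String) : ∀ (n : ℕ) (cs : List Char), cs.length ≤ n →
    (pvRuns cs).filterMap (fun p => if String.ofList [p.1] == key then some p.2 else none)
      = pvG key cs := by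
  intro n
  induction n with
  | zero =>
    intro cs h
    have : cs = [] := by cases cs <;> simp_all
    subst this; simp [pvRuns, pvG]
  | succ n ih =>
    intro cs h
    cases cs with
    | nil => simp [pvRuns, pvG]
    | cons c cs =>
      have hd := List.length_dropWhile_le (fun x => x == c) cs
      rw [pvRuns, List.filterMap_cons]
      by_cases hm : (String.ofList [c] == key) = true
      · simp only [hm, if_pos, pvG]
        rw [pvPred_eq key c hm,
          ih (cs.dropWhile (fun x => x == c)) (by simp at h; omega)]
      · simp only [hm]
        rw [if_neg (by simp), pvG, if_neg hm]
        have hsplit : cs = cs.takeWhile (fun x => x == c) ++ cs.dropWhile (fun x => x == c) :=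
          (List.takeWhile_append_dropWhile).symm
        rw [ih (cs.dropWhile (fun x => x == c)) (by simp at h; omega)]
        conv_rhs => rw [hsplit]
        refine (pvG_skip key _ _ ?_).symm
        intro x hx
        have hxc : (x == c) = true := List.mem_takeWhile_imp (p := fun x => x == c) hx
        rwa [beq_iff_eq.1 hxc]

-- peeling the leading matching run off B's run list
lemma pvL3 (key : String) (cs : List Char) :
    pvMx (pvG key cs)
      = max (((cs.takeWhile (fun x => String.ofList [x] == key)).length : Int))
          (pvMx (pvG key (cs.dropWhile (fun x => String.ofList [x] == key)))) := by
  cases cs with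
  | nil => simp [pvG, pvMx_nil]
  | cons c cs =>
    by_cases hm : (String.ofList [c] == key) = true
    · rw [pvG, if_pos hm]
      rw [pvMx_cons _ _ (by positivity)]
      simp only [List.takeWhile_cons, List.dropWhile_cons, hm, if_pos, List.length_cons]
      congr 1
      push_cast
      ring
    · rw [pvG, if_neg hm]
      simp only [List.takeWhile_cons, List.dropWhile_cons, hm, if_neg, Bool.false_eq_true,
        not_false_iff, List.length_nil]
      have h0 : 0 ≤ pvMx (pvG key cs) :=
        pvMx_nonneg _ (pvG_nonneg key cs.length cs le_rfl)
      rw [pvG, if_neg hm]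
      omega

lemma pvK (key : String) : ∀ (cs : List Char) (count : Int), 0 ≤ count →
    pvMx (pvF key cs count)
      = max (count + ((cs.takeWhile (fun x => String.ofList [x] == key)).length : Int))
          (pvMx (pvG key (cs.dropWhile (fun x => String.ofList [x] == key)))) := by
  intro cs
  induction cs with
  | nil =>
    intro count hc
    simp [pvF, pvG, pvMx_nil, pvMx_single]
    omega
  | cons c cs ih =>
    intro count hc
    by_cases hm : (String.ofList [c] == key) = true
    · rw [pvF, if_neg (by simpa using hm), ih (count + 1) (by omega)]
      simp only [List.takeWhile_cons, List.dropWhile_cons, hm, if_pos, List.length_cons]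
      congr 1
      push_cast
      ring
    · rw [pvF, if_pos (by simpa using hm)]
      rw [pvMx_cons _ _ hc, ih 0 le_rfl]
      simp only [List.takeWhile_cons, List.dropWhile_cons, hm, Bool.false_eq_true, if_false,
        List.length_nil, zero_add]
      rw [show pvG key (c :: cs) = pvG key cs from by rw [pvG, if_neg hm], pvL3 key cs]
      have h1 : 0 ≤ ((cs.takeWhile (fun x => String.ofList [x] == key)).length : Int) := by
        positivity
      omega

-- ===== VERDICT (by name: the statement is the Claim_ definition above) =====
theorem get_consective_items_spec : Claim_equal_get_consective_items := by
  intro items key _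
  unfold Spec_get_consective_items
  show get_consective_items items key = get_consective_items_alt items key
  have hA : get_consective_items items key = pvMx (pvALoop key items.toList 0 []) := rfl
  have hB : get_consective_items_alt items key
      = pvMx ((pvRuns items.toList).filterMap
          (fun p => if String.ofList [p.1] == key then some p.2 else none)) := rfl
  rw [hA, hB, pvALoop_eq, List.nil_append,
    pvRuns_filt_eq key items.toList.length items.toList le_rfl,
    pvK key items.toList 0 le_rfl, pvL3 key items.toList]
  simp
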